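-- pv_equiv track=rewrite | github.com/lessthanjake/playscii | svg_export.py | _mask_to_path_d
-- ===== SOURCE A (Python) =====
-- def _mask_to_path_d(mask):
--     """Row-run encode a boolean glyph mask into an SVG path 'd' attribute.
--     Each maximal horizontal run of opaque pixels becomes one unit-high
--     rectangular subpath. A single <path> can therefore describe the whole
--     glyph with one fill op."""
--     parts = []
--     for y, row in enumerate(mask):
--         cw = len(row)
--         x = 0
--         while x < cw:
--             if row[x]:
--                 x_start = x
--                 while x < cw and row[x]:
--                     x += 1
--                 run = x - x_start
--                 parts.append('M%d %dh%dv1h-%dz' % (x_start, y, run, run))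
--             else:
--                 x += 1
--     return ''.join(parts)
-- ===== SOURCE B (Python) =====
-- def _rle(row):
--     """Run-length encode a row into [value, count] groups (truthiness-keyed)."""
--     groups = []
--     for v in row:
--         v = bool(v)
--         if groups and groups[-1][0] == v:
--             groups[-1][1] += 1
--         else:
--             groups.append([v, 1])
--     return groups
--
--
-- def _mask_to_path_d(mask):
--     """Two-phase version: run-length encode each row, then emit one subpath
--     per opaque group while keeping a running x offset."""
--     parts = []
--     for y, row in enumerate(mask):
--         x = 0
--         for v, run in _rle(row):
--             if v:
--                 parts.append('M%d %dh%dv1h-%dz' % (x, y, run, run))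
--             x += run
--     return ''.join(parts)
-- ===== Notes on version B (the rewrite author's own statement) =====
-- stated objective: alternative
-- what changed: Replaces the nested index-tracking while-loops with a two-phase traversal: a run-length-encoding pass over each row followed by a fold over the groups carrying a running x offset.
import Mathlib
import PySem

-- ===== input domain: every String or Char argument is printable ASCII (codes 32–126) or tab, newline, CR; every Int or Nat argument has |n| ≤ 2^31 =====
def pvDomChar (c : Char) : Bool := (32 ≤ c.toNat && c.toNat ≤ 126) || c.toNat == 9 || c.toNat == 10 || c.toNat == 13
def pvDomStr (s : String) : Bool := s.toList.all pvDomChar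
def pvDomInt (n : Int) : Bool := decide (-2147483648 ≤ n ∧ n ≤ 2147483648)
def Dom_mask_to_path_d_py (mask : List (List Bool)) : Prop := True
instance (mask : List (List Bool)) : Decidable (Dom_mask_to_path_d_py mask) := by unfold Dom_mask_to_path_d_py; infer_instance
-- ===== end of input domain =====

-- B: two-phase per-row traversal (run-length encode, then emit groups with a running
-- x offset) instead of A's nested index-tracking while-loops; same output, same cost.

-- the shared format string 'M%d %dh%dv1h-%dz' (x and run are nonnegative Python ints)
def pvSeg (x : Nat) (y : Int) (run : Nat) : String :=
  "M" ++ toString x ++ " " ++ PySem.Int.toStr y ++ "h" ++ toString run ++ "v1h-" ++ toString run ++ "z"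

-- ===== PORT A =====
-- inner 'while x < cw and row[x]: x += 1'
def pvAInner (row : List Bool) (cw x : Nat) : Nat :=
  if h : x < cw ∧ row.getD x false = true then pvAInner row cw (x + 1) else x
termination_by cw - x
decreasing_by omega

theorem pvAInner_ge (row : List Bool) (cw : Nat) : ∀ x, x ≤ pvAInner row cw x := by
  intro x
  fun_induction pvAInner with
  | case1 x h ih => omega
  | case2 x h => omega

theorem pvAInner_gt (row : List Bool) (cw x : Nat)
    (h1 : x < cw) (h2 : row.getD x false = true) : x < pvAInner row cw x := by
  rw [pvAInner, dif_pos ⟨h1, h2⟩]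
  have := pvAInner_ge row cw (x + 1)
  omega

-- outer 'while x < cw: …' of one row, appending to parts
def pvAOuter (row : List Bool) (cw : Nat) (y : Int) (x : Nat) (parts : List String) : List String :=
  if h : x < cw then
    if hb : row.getD x false = true then
      let x_start := x
      let x' := pvAInner row cw x
      pvAOuter row cw y x' (parts ++ [pvSeg x_start y (x' - x_start)])
    else pvAOuter row cw y (x + 1) parts
  else parts
termination_by cw - x
decreasing_by
  · have := pvAInner_gt row cw x h hb; omega
  · omega

def mask_to_path_d_py (mask : List (List Bool)) : String :=
  let parts := (PySem.List.enumerate mask).foldl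
    (fun parts (yr : Int × List Bool) => pvAOuter yr.2 yr.2.length yr.1 0 parts) []
  PySem.Str.join "" parts

-- ===== PORT B =====
-- groups[-1]-updating append of Source B's _rle loop body
def pvPushRun : List (Bool × Nat) → Bool → List (Bool × Nat)
  | [], v => [(v, 1)]
  | [(w, n)], v => if w = v then [(w, n + 1)] else [(w, n), (v, 1)]
  | g :: g' :: gs, v => g :: pvPushRun (g' :: gs) v

def pvRle (row : List Bool) : List (Bool × Nat) :=
  row.foldl pvPushRun []

def mask_to_path_d_py_alt (mask : List (List Bool)) : String :=
  let parts := (PySem.List.enumerate mask).foldl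
    (fun parts (yr : Int × List Bool) =>
      ((pvRle yr.2).foldl
        (fun (st : List String × Nat) (g : Bool × Nat) =>
          (if g.1 then st.1 ++ [pvSeg st.2 yr.1 g.2] else st.1, st.2 + g.2))
        (parts, 0)).1) []
  PySem.Str.join "" parts

-- ===== PRECONDITION & SPEC =====
def Spec_mask_to_path_d_py (mask : List (List Bool)) (out : String) : Prop := out = mask_to_path_d_py_alt mask
instance (mask : List (List Bool)) (out : String) : Decidable (Spec_mask_to_path_d_py mask out) := by unfold Spec_mask_to_path_d_py; infer_instance

-- ===== CLAIM (what is proved, stated in full; the proofs are below) =====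
def Claim_equal_mask_to_path_d_py : Prop := ∀ (mask : List (List Bool)), Dom_mask_to_path_d_py mask → Spec_mask_to_path_d_py mask (mask_to_path_d_py mask)

-- ===== LEMMAS AND PROOFS =====

-- proof-side recursive run-length encoding
def pvRleSpec : List Bool → List (Bool × Nat)
  | [] => []
  | b :: l =>
    match pvRleSpec l with
    | [] => [(b, 1)]
    | (v, n) :: tl => if b = v then (v, n + 1) :: tl else (b, 1) :: (v, n) :: tl

-- segments emitted for a group list starting at offset x
def pvSegsOf : List (Bool × Nat) → Nat → Int → List String
  | [], _, _ => []
  | (v, n) :: tl, x, y => (if v then [pvSeg x y n] else []) ++ pvSegsOf tl (x + n) y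

theorem pvRleSpec_cons (b : Bool) (l : List Bool) :
    pvRleSpec (b :: l) = match pvRleSpec l with
      | [] => [(b, 1)]
      | (v, n) :: tl => if b = v then (v, n + 1) :: tl else (b, 1) :: (v, n) :: tl := rfl

theorem pvRleSpec_head (b : Bool) (l : List Bool) :
    ∃ n tl, pvRleSpec (b :: l) = (b, n) :: tl := by
  rw [pvRleSpec_cons]
  rcases pvRleSpec l with _ | ⟨⟨v, n⟩, tl⟩
  · exact ⟨1, [], rfl⟩
  · by_cases h : b = v
    · subst h; exact ⟨n + 1, tl, by simp⟩
    · exact ⟨1, (v, n) :: tl, by simp [h]⟩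

theorem pvRleSpec_snoc (v : Bool) : ∀ m : List Bool, pvRleSpec (m ++ [v]) = pvPushRun (pvRleSpec m) v := by
  intro m
  induction m with
  | nil => simp [pvRleSpec, pvPushRun]
  | cons a m ih =>
    rcases hm : pvRleSpec m with _ | ⟨⟨w, n⟩, tl⟩
    · simp only [List.cons_append, pvRleSpec, ih, hm, pvPushRun]
      by_cases hav : a = v <;> simp [hav, pvRleSpec, pvPushRun]
    · rcases tl with _ | ⟨⟨w2, n2⟩, ts⟩
      · by_cases haw : a = w <;> by_cases hwv : w = v <;>
          simp [pvRleSpec, ih, hm, pvPushRun, haw, hwv] <;>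
          simp_all [pvPushRun]
      · by_cases haw : a = w <;>
          simp only [List.cons_append, pvRleSpec, ih, hm, pvPushRun, if_pos, if_neg, haw] <;>
          simp [pvPushRun, pvRleSpec, haw]
theorem pvRle_eq_spec (l : List Bool) : pvRle l = pvRleSpec l := by
  induction l using List.reverseRecOn with
  | nil => rfl
  | append_singleton m v ih =>
    simp only [pvRle, List.foldl_append, List.foldl_cons, List.foldl_nil] at *
    rw [ih, pvRleSpec_snoc]

theorem pvSegsOf_false (l : List Bool) (x : Nat) (y : Int) :
    pvSegsOf (pvRleSpec (false :: l)) x y = pvSegsOf (pvRleSpec l) (x + 1) y := by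
  rcases h : pvRleSpec l with _ | ⟨⟨v, n⟩, tl⟩
  · simp [pvRleSpec, h, pvSegsOf]
  · cases v <;> simp [pvRleSpec, h, pvSegsOf, Nat.add_assoc, Nat.add_comm 1 n]

theorem pvRleSpec_true (l : List Bool) :
    pvRleSpec (true :: l) =
      (true, (l.takeWhile (fun b => b)).length + 1) ::
        pvRleSpec (l.drop (l.takeWhile (fun b => b)).length) := by
  induction l with
  | nil => simp [pvRleSpec]
  | cons b l ih =>
    cases b
    · obtain ⟨n, tl, h⟩ := pvRleSpec_head false l
      rw [pvRleSpec_cons, h]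
      simp [List.takeWhile_cons, h]
    · rw [pvRleSpec_cons, ih]
      simp [List.takeWhile_cons, List.drop_succ_cons]

theorem pvAInner_eq (row : List Bool) (x : Nat) :
    pvAInner row row.length x = x + ((row.drop x).takeWhile (fun b => b)).length := by
  fun_induction pvAInner with
  | case1 x h ih =>
    obtain ⟨hlt, hget⟩ := h
    have hd : row.drop x = row[x] :: row.drop (x + 1) := List.drop_eq_getElem_cons hlt
    have hg : row[x] = true := by rwa [List.getD_eq_getElem _ _ hlt] at hget
    rw [hd, hg, ih]
    simp [List.takeWhile]
    all_goals omega
  | case2 x h =>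
    by_cases hlt : x < row.length
    · have hget : row.getD x false = false := by
        rcases hr : row.getD x false
        · rfl
        · exact absurd ⟨hlt, hr⟩ h
      have hd : row.drop x = row[x] :: row.drop (x + 1) := List.drop_eq_getElem_cons hlt
      have hg : row[x] = false := by rwa [List.getD_eq_getElem _ _ hlt] at hget
      rw [hd, hg]
      simp [List.takeWhile]
    · rw [List.drop_eq_nil_of_le (by omega)]
      simp

theorem pvAOuter_eq (row : List Bool) (y : Int) :
    ∀ x parts, pvAOuter row row.length y x parts = parts ++ pvSegsOf (pvRleSpec (row.drop x)) x y := by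
  intro x parts
  fun_induction pvAOuter with
  | case1 x parts h hb x_start x' ih =>
    have hd : row.drop x = row[x] :: row.drop (x + 1) := List.drop_eq_getElem_cons h
    have hg : row[x] = true := by rwa [List.getD_eq_getElem _ _ h] at hb
    have hx' : x' = x + (((row.drop (x+1)).takeWhile (fun b => b)).length + 1) := by
      show pvAInner row row.length x = _
      rw [pvAInner_eq, hd, hg]
      simp [List.takeWhile]
      all_goals omega
    rw [ih, hd, hg, pvRleSpec_true]
    have hdd : (row.drop (x+1)).drop ((row.drop (x+1)).takeWhile (fun b => b)).length
        = row.drop x' := by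
      rw [List.drop_drop, hx']
      congr 1
      omega
    rw [hdd]
    simp only [pvSegsOf, List.append_assoc]
    congr 2
    all_goals first
      | (congr 2 <;> omega)
      | (congr 1 <;> omega)
      | omega
  | case2 x parts h hb ih =>
    have hd : row.drop x = row[x] :: row.drop (x + 1) := List.drop_eq_getElem_cons h
    have hg : row[x] = false := by
      have : ¬ row.getD x false = true := hb
      rwa [List.getD_eq_getElem _ _ h, Bool.not_eq_true] at this
    rw [ih, hd, hg, pvSegsOf_false]
  | case3 x parts h =>
    rw [List.drop_eq_nil_of_le (by omega)]
    simp [pvRleSpec, pvSegsOf]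

theorem pvBRow_eq (y : Int) :
    ∀ (gs : List (Bool × Nat)) (parts : List String) (x : Nat),
      (gs.foldl (fun (st : List String × Nat) (g : Bool × Nat) =>
          (if g.1 then st.1 ++ [pvSeg st.2 y g.2] else st.1, st.2 + g.2)) (parts, x)).1
        = parts ++ pvSegsOf gs x y := by
  intro gs
  induction gs with
  | nil => simp [pvSegsOf]
  | cons g tl ih =>
    intro parts x
    obtain ⟨v, n⟩ := g
    cases v <;> simp [List.foldl_cons, ih, pvSegsOf]

theorem pvFold_eq :
    ∀ (pairs : List (Int × List Bool)) (parts : List String),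
      pairs.foldl (fun parts (yr : Int × List Bool) => pvAOuter yr.2 yr.2.length yr.1 0 parts) parts
        = pairs.foldl (fun parts (yr : Int × List Bool) =>
            ((pvRle yr.2).foldl
              (fun (st : List String × Nat) (g : Bool × Nat) =>
                (if g.1 then st.1 ++ [pvSeg st.2 yr.1 g.2] else st.1, st.2 + g.2))
              (parts, 0)).1) parts := by
  intro pairs
  induction pairs with
  | nil => intro parts; rfl
  | cons yr tl ih =>
    intro parts
    simp only [List.foldl_cons]
    rw [pvAOuter_eq, pvBRow_eq, pvRle_eq_spec, List.drop_zero, ih]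

-- ===== VERDICT (by name: the statement is the Claim_ definition above) =====
theorem mask_to_path_d_py_spec : Claim_equal_mask_to_path_d_py := by
  intro mask _
  unfold Spec_mask_to_path_d_py mask_to_path_d_py mask_to_path_d_py_alt
  rw [pvFold_eq]
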